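-- pv_equiv track=rewrite | github.com/Jiang0307/WIRELESS_COMMUNICATIONS_AND_MOBILE_NETWORKS | QUESTION 1/QUESTION 1.py | check_turn
-- ===== SOURCE A (Python) =====
-- BLOCK_SIZE = (50,50) ; BASE_STATION_SIZE = (40,40) ; ROAD_WIDTH = 15 ; RATIO = BLOCK_SIZE[0]/2.5
--
-- BLOCK_SIZE = (50,50) ; BASE_STATION_SIZE = (40,40) ; ROAD_WIDTH = 15 ; RATIO = BLOCK_SIZE[0]/2.5
--
-- def check_turn(x,y):
--     for i in range(10):
--         for j in range(10):
--             car_x = ( (BLOCK_SIZE[0] + ROAD_WIDTH) * i) + BLOCK_SIZE[0]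
--             car_y = ( (BLOCK_SIZE[1] + ROAD_WIDTH) * j) + BLOCK_SIZE[1]
--             if car_x == x and car_y == y:
--                 return 1
--     return 0
-- ===== SOURCE B (Python) =====
-- BLOCK_SIZE = (50,50) ; BASE_STATION_SIZE = (40,40) ; ROAD_WIDTH = 15 ; RATIO = BLOCK_SIZE[0]/2.5
--
-- def check_turn(x, y):
--     valid = [(BLOCK_SIZE[0] + ROAD_WIDTH) * k + BLOCK_SIZE[0] for k in range(10)]
--     return 1 if x in valid and y in valid else 0
-- ===== Notes on version B (the rewrite author's own statement) =====
-- stated objective: simpler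
-- what changed: Replaces the 100-iteration nested 2D scan with one precomputed list of the 10 grid coordinates and two independent membership tests, exploiting that the match condition factors over x and y.
import Mathlib
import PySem

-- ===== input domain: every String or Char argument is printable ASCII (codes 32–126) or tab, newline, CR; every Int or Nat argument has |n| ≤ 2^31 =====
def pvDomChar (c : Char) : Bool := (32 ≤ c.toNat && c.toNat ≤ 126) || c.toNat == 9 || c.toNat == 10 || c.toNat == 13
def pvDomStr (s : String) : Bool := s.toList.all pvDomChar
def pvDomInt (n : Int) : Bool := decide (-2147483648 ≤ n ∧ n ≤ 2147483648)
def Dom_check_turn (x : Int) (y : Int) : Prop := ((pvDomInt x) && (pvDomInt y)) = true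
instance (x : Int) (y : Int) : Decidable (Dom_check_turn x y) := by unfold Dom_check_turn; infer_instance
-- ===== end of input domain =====

-- ===== PORT A =====
-- B factors A's nested 2D grid scan into one precomputed coordinate list and two 1D membership tests (return value only).
def check_turn (x : Int) (y : Int) : Int :=
  if (PySem.List.pyRange 0 10 1).any (fun i =>
       (PySem.List.pyRange 0 10 1).any (fun j =>
         (((50 + 15) * i + 50 == x) && ((50 + 15) * j + 50 == y))))
  then 1 else 0

-- ===== PORT B =====
def check_turn_alt (x : Int) (y : Int) : Int :=
  let valid := (PySem.List.pyRange 0 10 1).map (fun k => (50 + 15) * k + 50)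
  if valid.contains x && valid.contains y then 1 else 0

-- ===== PRECONDITION & SPEC =====
def Spec_check_turn (x : Int) (y : Int) (out : Int) : Prop := out = check_turn_alt x y
instance (x : Int) (y : Int) (out : Int) : Decidable (Spec_check_turn x y out) := by unfold Spec_check_turn; infer_instance

-- ===== CLAIM (what is proved, stated in full; the proofs are below) =====
def Claim_equal_check_turn : Prop := ∀ (x : Int) (y : Int), Dom_check_turn x y → Spec_check_turn x y (check_turn x y)

-- ===== LEMMAS AND PROOFS =====

-- ===== VERDICT (by name: the statement is the Claim_ definition above) =====
theorem any_and_const {α : Type} (l : List α) (p : α → Bool) (c : Bool) :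
    l.any (fun a => p a && c) = (l.any p && c) := by
  induction l with
  | nil => simp
  | cons h t ih => cases c <;> simp_all [List.any_cons]

theorem any_factor {α β : Type} (l1 : List α) (l2 : List β) (p : α → Bool) (q : β → Bool) :
    l1.any (fun i => l2.any (fun j => p i && q j)) = (l1.any p && l2.any q) := by
  induction l1 with
  | nil => simp
  | cons h t ih =>
    simp only [List.any_cons, ih]
    rw [show (fun j => p h && q j) = (fun j => q j && p h) by funext j; exact Bool.and_comm _ _,
        any_and_const]
    cases p h <;> cases l2.any q <;> cases t.any p <;> rfl

theorem contains_map_grid (z : Int) :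
    ((PySem.List.pyRange 0 10 1).map (fun k => (50 + 15) * k + 50)).contains z
      = (PySem.List.pyRange 0 10 1).any (fun k => ((50 + 15) * k + 50 == z)) := by
  rw [List.contains_eq_any_beq, List.any_map]
  congr 1; funext k; simp [eq_comm]

theorem check_turn_spec : Claim_equal_check_turn := by
  intro x y _
  unfold Spec_check_turn check_turn check_turn_alt
  rw [any_factor]
  simp only [contains_map_grid]
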